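-- pv_equiv track=rewrite | github.com/guppykang/KerenlizedPerceptron | pa4.py | kernelFunction
-- ===== SOURCE A (Python) =====
-- def kernelFunction(first, second, p):
--     count = 0
--     substringsInSecond = []
--     for start in range(0, len(second) - p + 1):
--         v = second[start : start + p]
--         substringsInSecond.append(v)
--
--     for start in range(0, len(first) - p + 1):
--         v = first[start : start + p]
--         count += substringsInSecond.count(v)
--
--     return count
-- ===== SOURCE B (Python) =====
-- def kernelFunction(first, second, p):
--     xs = sorted([first[i : i + p] for i in range(0, len(first) - p + 1)])
--     ys = sorted([second[i : i + p] for i in range(0, len(second) - p + 1)])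
--     total = 0
--     i = j = 0
--     while i < len(xs) and j < len(ys):
--         if xs[i] < ys[j]:
--             i += 1
--         elif ys[j] < xs[i]:
--             j += 1
--         else:
--             v = xs[i]
--             ci = 0
--             while i < len(xs) and xs[i] == v:
--                 ci += 1
--                 i += 1
--             cj = 0
--             while j < len(ys) and ys[j] == v:
--                 cj += 1
--                 j += 1
--             total += ci * cj
--     return total
-- ===== Notes on version B (the rewrite author's own statement) =====
-- stated objective: faster
-- what changed: Instead of scanning the whole list of second's substrings once per substring of first (list.count in a loop), B sorts both substring lists and counts matches with a two-pointer run merge, adding the product of equal-run lengths for each common value.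
import Mathlib
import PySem

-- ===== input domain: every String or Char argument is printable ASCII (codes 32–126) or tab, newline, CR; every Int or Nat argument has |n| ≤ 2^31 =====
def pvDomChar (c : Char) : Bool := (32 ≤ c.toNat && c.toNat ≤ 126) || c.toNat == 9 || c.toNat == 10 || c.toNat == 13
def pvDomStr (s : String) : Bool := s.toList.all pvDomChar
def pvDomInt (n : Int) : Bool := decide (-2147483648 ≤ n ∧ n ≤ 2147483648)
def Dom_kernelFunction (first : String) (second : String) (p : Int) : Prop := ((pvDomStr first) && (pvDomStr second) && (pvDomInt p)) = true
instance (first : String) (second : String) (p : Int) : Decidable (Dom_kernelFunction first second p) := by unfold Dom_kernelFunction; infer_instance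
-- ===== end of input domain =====

-- B replaces A's quadratic scan-per-substring by sorting both substring lists and a
-- two-pointer run merge; return value only.

-- ===== PORT A =====
def kernelFunction (first : String) (second : String) (p : Int) : Int :=
  let substringsInSecond : List String :=
    (PySem.List.pyRange 0 (PySem.Str.len second - p + 1) 1).foldl
      (fun acc start => acc ++ [PySem.Str.slice second (some start) (some (start + p))]) []
  (PySem.List.pyRange 0 (PySem.Str.len first - p + 1) 1).foldl
    (fun count start =>
      count + (PySem.List.count substringsInSecond (PySem.Str.slice first (some start) (some (start + p))) : Int))
    0

-- ===== PORT B =====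
-- inner 'while xs[i] == v' run loop of Source B: (run length, remaining suffix)
def pvRunSplit (v : String) : List String → Nat × List String
  | [] => (0, [])
  | x :: xs =>
    if x = v then ((pvRunSplit v xs).1 + 1, (pvRunSplit v xs).2)
    else (0, x :: xs)

theorem pvRunSplit_len (v : String) (l : List String) : (pvRunSplit v l).2.length ≤ l.length := by
  induction l with
  | nil => simp [pvRunSplit]
  | cons x xs ih =>
    by_cases h : x = v <;> simp [pvRunSplit, h] <;> omega

-- outer two-pointer merge loop of Source B (index advance = list tail)
def pvMerge : List String → List String → Int
  | [], _ => 0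
  | _ :: _, [] => 0
  | x :: xs, y :: ys =>
    if x < y then pvMerge xs (y :: ys)
    else if y < x then pvMerge (x :: xs) ys
    else
      ((pvRunSplit x (x :: xs)).1 * (pvRunSplit x (y :: ys)).1 : Int)
        + pvMerge (pvRunSplit x (x :: xs)).2 (pvRunSplit x (y :: ys)).2
termination_by l1 l2 => l1.length + l2.length
decreasing_by
  all_goals
    have hy : (y :: ys).length = ys.length + 1 := rfl
  all_goals
    have hx : (x :: xs).length = xs.length + 1 := rfl
  all_goals try
    rename_i hnlt hnlt'
    have hxy : x = y := le_antisymm (not_lt.mp hnlt') (not_lt.mp hnlt)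
    have h1 := pvRunSplit_len x xs
    have h2 := pvRunSplit_len x ys
    have e1 : (pvRunSplit x (x :: xs)).2 = (pvRunSplit x xs).2 := by simp [pvRunSplit]
    have e2 : (pvRunSplit x (y :: ys)).2 = (pvRunSplit x ys).2 := by
      simp [pvRunSplit, hxy.symm]
    rw [e1, e2]
  all_goals omega

def kernelFunction_alt (first : String) (second : String) (p : Int) : Int :=
  let xs :=
    PySem.List.sorted
      ((PySem.List.pyRange 0 (PySem.Str.len first - p + 1) 1).map
        (fun i => PySem.Str.slice first (some i) (some (i + p)))) (fun x => x) false
  let ys :=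
    PySem.List.sorted
      ((PySem.List.pyRange 0 (PySem.Str.len second - p + 1) 1).map
        (fun i => PySem.Str.slice second (some i) (some (i + p)))) (fun x => x) false
  pvMerge xs ys

-- ===== PRECONDITION & SPEC =====
def Spec_kernelFunction (first : String) (second : String) (p : Int) (out : Int) : Prop := out = kernelFunction_alt first second p
instance (first : String) (second : String) (p : Int) (out : Int) : Decidable (Spec_kernelFunction first second p out) := by unfold Spec_kernelFunction; infer_instance

-- ===== CLAIM (what is proved, stated in full; the proofs are below) =====
def Claim_equal_kernelFunction : Prop := ∀ (first : String) (second : String) (p : Int), Dom_kernelFunction first second p → Spec_kernelFunction first second p (kernelFunction first second p)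

-- ===== LEMMAS AND PROOFS =====

-- A's append loop is a map
theorem pv_foldl_app {α β : Type} (f : α → β) (l : List α) (acc : List β) :
    l.foldl (fun a x => a ++ [f x]) acc = acc ++ l.map f := by
  induction l generalizing acc with
  | nil => simp
  | cons x xs ih => simp [List.foldl, ih]

-- A's counting loop is a sum
theorem pv_foldl_add {α : Type} (f : α → Int) (l : List α) (a : Int) :
    l.foldl (fun c x => c + f x) a = a + (l.map f).sum := by
  induction l generalizing a with
  | nil => simp
  | cons x xs ih => simp [List.foldl, ih]; ring

theorem pvRunSplit_decomp (v : String) (l : List String) :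
    l = List.replicate (pvRunSplit v l).1 v ++ (pvRunSplit v l).2 := by
  induction l with
  | nil => simp [pvRunSplit]
  | cons x xs ih =>
    by_cases h : x = v
    · subst h
      simp only [pvRunSplit]
      exact congrArg (x :: ·) ih
    · simp [pvRunSplit, h]

theorem pvRunSplit_rest_gt (v : String) (l : List String)
    (hs : l.Pairwise (· ≤ ·)) (hge : ∀ a ∈ l, v ≤ a) :
    ∀ a ∈ (pvRunSplit v l).2, v < a := by
  induction l with
  | nil => simp [pvRunSplit]
  | cons x xs ih =>
    by_cases h : x = v
    · simp only [pvRunSplit, if_pos h]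
      exact ih hs.of_cons (fun a ha => h ▸ (List.pairwise_cons.mp hs).1 a ha)
    · simp only [pvRunSplit, if_neg h]
      intro a ha
      have hvx : v < x := lt_of_le_of_ne (hge x (by simp)) (Ne.symm h)
      rcases List.mem_cons.mp ha with rfl | ha
      · exact hvx
      · exact lt_of_lt_of_le hvx ((List.pairwise_cons.mp hs).1 a ha)

theorem pv_count_eq_zero_of_gt (v : String) (l : List String)
    (h : ∀ a ∈ l, v < a) : l.count v = 0 := by
  rw [List.count_eq_zero]
  intro hv
  exact absurd rfl (ne_of_lt (h v hv))

-- main lemma: on sorted lists the run merge computes the pairwise-match sum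
theorem pvMerge_eq (l1 l2 : List String)
    (h1 : l1.Pairwise (· ≤ ·)) (h2 : l2.Pairwise (· ≤ ·)) :
    pvMerge l1 l2 = (l1.map (fun a => (l2.count a : Int))).sum := by
  induction l1, l2 using pvMerge.induct with
  | case1 l2 => simp [pvMerge]
  | case2 x xs => simp [pvMerge]
  | case3 x xs y ys hlt ih =>
    -- x < y: x occurs nowhere in y :: ys
    have hzero : (y :: ys).count x = 0 := by
      apply pv_count_eq_zero_of_gt
      intro a ha
      rcases List.mem_cons.mp ha with rfl | ha
      · exact hlt
      · exact lt_of_lt_of_le hlt ((List.pairwise_cons.mp h2).1 a ha)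
    simp only [pvMerge, if_pos hlt, List.map_cons, List.sum_cons, hzero]
    rw [ih h1.of_cons h2]
    simp
  | case4 x xs y ys hnlt hlt ih =>
    -- y < x: y matches nothing in x :: xs
    have hx : ∀ a ∈ x :: xs, y < a := by
      intro a ha
      rcases List.mem_cons.mp ha with rfl | ha
      · exact hlt
      · exact lt_of_lt_of_le hlt ((List.pairwise_cons.mp h1).1 a ha)
    simp only [pvMerge, if_neg hnlt, if_pos hlt]
    rw [ih h1 h2.of_cons]
    apply congrArg List.sum
    apply List.map_congr_left
    intro a ha
    have : (y :: ys).count a = ys.count a := by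
      rw [List.count_cons]
      simp [ne_of_lt (hx a ha)]
    rw [this]
  | case5 x xs y ys hnlt hnlt' ih =>
    have hxy : x = y := le_antisymm (not_lt.mp hnlt') (not_lt.mp hnlt)
    subst hxy
    set c1 := (pvRunSplit x (x :: xs)).1 with hc1
    set r1 := (pvRunSplit x (x :: xs)).2 with hr1
    set c2 := (pvRunSplit x (x :: ys)).1 with hc2
    set r2 := (pvRunSplit x (x :: ys)).2 with hr2
    have hd1 : x :: xs = List.replicate c1 x ++ r1 := pvRunSplit_decomp x (x :: xs)
    have hd2 : x :: ys = List.replicate c2 x ++ r2 := pvRunSplit_decomp x (x :: ys)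
    have hge1 : ∀ a ∈ x :: xs, x ≤ a := by
      intro a ha
      rcases List.mem_cons.mp ha with rfl | ha
      · exact le_refl a
      · exact (List.pairwise_cons.mp h1).1 a ha
    have hge2 : ∀ a ∈ x :: ys, x ≤ a := by
      intro a ha
      rcases List.mem_cons.mp ha with rfl | ha
      · exact le_refl a
      · exact (List.pairwise_cons.mp h2).1 a ha
    have hg1 : ∀ a ∈ r1, x < a := pvRunSplit_rest_gt x (x :: xs) h1 hge1
    have hg2 : ∀ a ∈ r2, x < a := pvRunSplit_rest_gt x (x :: ys) h2 hge2
    have hp1 : r1.Pairwise (· ≤ ·) := ((hd1 ▸ h1).sublist (List.sublist_append_right _ _))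
    have hp2 : r2.Pairwise (· ≤ ·) := ((hd2 ▸ h2).sublist (List.sublist_append_right _ _))
    -- count of x in l2 is c2
    have hcx : ((x :: ys).count x : Int) = c2 := by
      rw [hd2, List.count_append, List.count_replicate, pv_count_eq_zero_of_gt x r2 hg2]
      simp
    -- counts of r1's elements in l2 reduce to counts in r2
    have hcr : ∀ a ∈ r1, (x :: ys).count a = r2.count a := by
      intro a ha
      rw [hd2, List.count_append, List.count_replicate]
      have : ¬ (x == a) = true := by
        simp only [beq_iff_eq]
        exact ne_of_lt (hg1 a ha)
      simp [this]
    calc pvMerge (x :: xs) (x :: ys)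
        = (c1 * c2 : Int) + pvMerge r1 r2 := by
          rw [pvMerge]
          simp only [lt_self_iff_false, if_false, ← hc1, ← hr1, ← hc2, ← hr2]
      _ = (c1 * c2 : Int) + (r1.map (fun a => (r2.count a : Int))).sum := by
          rw [ih hp1 hp2]
      _ = ((x :: xs).map (fun a => ((x :: ys).count a : Int))).sum := by
          rw [hd1, List.map_append, List.sum_append, List.map_replicate, List.sum_replicate,
            hcx]
          have : (r1.map (fun a => ((x :: ys).count a : Int)))
               = (r1.map (fun a => (r2.count a : Int))) := by
            apply List.map_congr_left
            intro a ha
            rw [hcr a ha]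
          rw [this]
          ring

-- ===== VERDICT (by name: the statement is the Claim_ definition above) =====
theorem kernelFunction_spec : Claim_equal_kernelFunction := by
  intro first second p _
  unfold Spec_kernelFunction kernelFunction kernelFunction_alt
  simp only [pv_foldl_app, List.nil_append]
  set L1 := (PySem.List.pyRange 0 (PySem.Str.len first - p + 1) 1).map
    (fun i => PySem.Str.slice first (some i) (some (i + p))) with hL1
  set L2 := (PySem.List.pyRange 0 (PySem.Str.len second - p + 1) 1).map
    (fun i => PySem.Str.slice second (some i) (some (i + p))) with hL2
  have hA : (PySem.List.pyRange 0 (PySem.Str.len first - p + 1) 1).foldl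
      (fun count start =>
        count + (PySem.List.count L2 (PySem.Str.slice first (some start) (some (start + p))) : Int)) 0
      = (L1.map (fun a => (L2.count a : Int))).sum := by
    rw [pv_foldl_add]
    simp only [hL1, List.map_map, Function.comp_def, PySem.List.count_eq]
    simp
  rw [hA]
  have hperm1 : (PySem.List.sorted L1 (fun x => x) false).Perm L1 :=
    PySem.List.sorted_perm L1 (fun x => x) false
  have hperm2 : (PySem.List.sorted L2 (fun x => x) false).Perm L2 :=
    PySem.List.sorted_perm L2 (fun x => x) false
  rw [pvMerge_eq _ _ (by simpa using PySem.List.sorted_pairwise (xs := L1) (key := fun x => x))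
      (by simpa using PySem.List.sorted_pairwise (xs := L2) (key := fun x => x))]
  have : ((PySem.List.sorted L1 (fun x => x) false).map
      (fun a => ((PySem.List.sorted L2 (fun x => x) false).count a : Int)))
      = ((PySem.List.sorted L1 (fun x => x) false).map (fun a => (L2.count a : Int))) := by
    apply List.map_congr_left
    intro a _
    rw [hperm2.count_eq]
  rw [this, (hperm1.map (fun a => (L2.count a : Int))).sum_eq]
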